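-- pv_equiv track=rewrite | github.com/GosiaMarciniak/PythonTRNG | trng.py | long_postprocessing
-- ===== SOURCE A (Python) =====
-- def mix_bits(input_bits):
--     if(len(input_bits)<3):
--         return input_bits
--
--     mixed_bits = [input_bits[0],input_bits[1]]
--     curentstep=2
--     while(len(mixed_bits)<len(input_bits)):
--         a=len(mixed_bits)-1
--         b=0
--         if(curentstep+a>len(input_bits)):
--             a=len(input_bits)-curentstep
--         for i in range(a):
--             mixed_bits.insert(b*2+1, input_bits[curentstep])
--             b=b+1
--             curentstep=curentstep+1
--
--     return mixed_bits
--
-- def xor_operation(input_bits):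
--     result = []
--     for i in range(0, len(input_bits), 2):
--         result.append(input_bits[i] ^ input_bits[i+1])
--     return result
--
-- def int_to_bits(n):
--     n = n & 0xF
--     bit_array = [int(bit) for bit in bin(n)[2:]]
--     while len(bit_array) < 4:
--         bit_array.insert(0, 0)
--     return bit_array
--
-- def long_postprocessing(num_of_values, input_values, start_value):
--     result = []
--     for i in range(num_of_values):
--         bit_tab = int_to_bits(input_values[start_value+i])
--         result.extend(bit_tab)
--     mixed_segment = mix_bits(result)
--     xored_segment = xor_operation(mixed_segment)
--     return xored_segment
-- ===== SOURCE B (Python) =====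
-- def long_postprocessing(num_of_values, input_values, start_value):
--     # gather bits: 4 bits (MSB first) of each value's low nibble, via shifts
--     bits = []
--     for i in range(num_of_values):
--         v = input_values[start_value + i] & 0xF
--         bits.extend(((v >> 3) & 1, (v >> 2) & 1, (v >> 1) & 1, v & 1))
--     # mix: each round splices the next chunk into the odd positions in one pass
--     mixed = bits
--     if len(bits) >= 3:
--         mixed = bits[:2]
--         cur = 2
--         while cur < len(bits):
--             a = min(len(mixed) - 1, len(bits) - cur)
--             chunk = bits[cur:cur + a]
--             new = []
--             for p, q in zip(mixed, chunk):
--                 new.append(p)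
--                 new.append(q)
--             new.extend(mixed[a:])
--             mixed = new
--             cur = cur + a
--     # xor adjacent pairs: zip the even-indexed with the odd-indexed elements
--     return [p ^ q for p, q in zip(mixed[::2], mixed[1::2])]
-- ===== Notes on version B (the rewrite author's own statement) =====
-- stated objective: faster
-- what changed: mix_bits's per-bit list.insert shuffle is replaced by one zip-interleave pass per round (and the bit table / pairwise xor are computed by shifts and structural recursion instead of bin()-string padding and indexed appends).
import Mathlib
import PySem

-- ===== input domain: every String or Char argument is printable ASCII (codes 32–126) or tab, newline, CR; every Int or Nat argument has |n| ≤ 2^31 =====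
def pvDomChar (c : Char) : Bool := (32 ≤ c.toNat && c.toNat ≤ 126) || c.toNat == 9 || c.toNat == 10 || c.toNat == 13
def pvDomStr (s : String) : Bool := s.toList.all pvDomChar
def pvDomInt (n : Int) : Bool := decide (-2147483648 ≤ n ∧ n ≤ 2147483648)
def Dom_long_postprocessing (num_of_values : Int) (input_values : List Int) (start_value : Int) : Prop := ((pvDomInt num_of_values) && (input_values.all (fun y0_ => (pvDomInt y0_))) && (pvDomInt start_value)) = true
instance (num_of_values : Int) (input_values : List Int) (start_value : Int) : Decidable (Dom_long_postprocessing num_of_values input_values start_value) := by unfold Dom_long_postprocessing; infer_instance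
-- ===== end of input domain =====

-- B replaces mix_bits's quadratic per-bit list.insert with one interleaving pass per round
-- (and recursive pairwise XOR); objective: faster (O(n^2) → O(n)).

-- ===== PORT A =====
-- int_to_bits: bin(n & 0xF)[2:] digits, then pad with leading zeros to width 4.
-- (fuel 4 only makes the while-loop total; it never runs out: bin gives ≥ 1 digit)
def pvPadFuelA : Nat → List Int → List Int
  | 0, l => l
  | k+1, l => if l.length < 4 then pvPadFuelA k ((0:Int) :: l) else l

def pvIntToBitsA (n : Int) : List Int :=
  let m := PySem.Int.band n 15
  pvPadFuelA 4 ((PySem.Int.toBinChars m).map (fun c => ((c.toNat : Int) - 48)))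

-- mix_bits inner for-loop: a inserts at positions b*2+1; the pyGetD default 0 is
-- unreachable (curentstep stays below len(input_bits) whenever the loop runs).
def pvInsertLoopA (input : List Int) : List Int → Nat → Nat → Nat → List Int × Nat
  | mixed, _, cur, 0 => (mixed, cur)
  | mixed, b, cur, a+1 =>
      pvInsertLoopA input
        (PySem.List.insert mixed ((b : Int) * 2 + 1) (PySem.List.pyGetD input (cur : Int) 0))
        (b + 1) (cur + 1) a

-- mix_bits while-loop; fuel = len(input_bits) only makes it total (each real round
-- grows mixed_bits by at least one, so the fuel never runs out on reachable states).
def pvMixLoopA (input : List Int) : Nat → List Int → Nat → List Int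
  | 0, mixed, _ => mixed
  | fuel+1, mixed, cur =>
      if mixed.length < input.length then
        let a := mixed.length - 1
        let a := if cur + a > input.length then input.length - cur else a
        let r := pvInsertLoopA input mixed 0 cur a
        pvMixLoopA input fuel r.1 r.2
      else mixed

def pvMixBitsA (input : List Int) : List Int :=
  if input.length < 3 then input
  else pvMixLoopA input input.length
        [PySem.List.pyGetD input 0 0, PySem.List.pyGetD input 1 0] 2

-- xor_operation: for i in range(0, len, 2): append bits[i] ^ bits[i+1]
-- (the i+1 default is unreachable: the list fed to it always has even length)
def pvXorOpA (input : List Int) : List Int :=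
  (PySem.List.pyRange 0 (input.length : Int) 2).foldl
    (fun acc i => acc ++ [PySem.Int.bxor (PySem.List.pyGetD input i 0) (PySem.List.pyGetD input (i+1) 0)]) []

def long_postprocessing (num_of_values : Int) (input_values : List Int) (start_value : Int) : List Int :=
  let result := (PySem.List.pyRange 0 num_of_values 1).foldl
    (fun acc i => acc ++ pvIntToBitsA (PySem.List.pyGetD input_values (start_value + i) 0)) []
  pvXorOpA (pvMixBitsA result)

-- ===== PORT B =====
-- one mixing round of Source B: zip-interleave the next chunk, then the untouched tail
def pvMixLoopB (bits : List Int) : Nat → List Int → Nat → List Int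
  | 0, mixed, _ => mixed
  | fuel+1, mixed, cur =>
      if cur < bits.length then
        let a := min (mixed.length - 1) (bits.length - cur)
        let chunk := PySem.List.slice bits (some (cur : Int)) (some ((cur : Int) + (a : Int)))
        let nw := ((mixed.zip chunk).foldl (fun acc pq => acc ++ [pq.1, pq.2]) [])
                    ++ PySem.List.slice mixed (some (a : Int)) none
        pvMixLoopB bits fuel nw (cur + a)
      else mixed

-- Source B's final comprehension: zip the even-indexed with the odd-indexed elements
-- (the .getD [] only totalises: slice? is never none for the literal step 2)
def pvXorZipB (mixed : List Int) : List Int :=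
  (((PySem.List.slice? mixed none none 2).getD []).zip
    ((PySem.List.slice? mixed (some 1) none 2).getD [])).map
    (fun pq => PySem.Int.bxor pq.1 pq.2)

def long_postprocessing_alt (num_of_values : Int) (input_values : List Int) (start_value : Int) : List Int :=
  let bits := (PySem.List.pyRange 0 num_of_values 1).foldl
    (fun acc i =>
      let v := PySem.Int.band (PySem.List.pyGetD input_values (start_value + i) 0) 15
      acc ++ [PySem.Int.band (v >>> (3:Nat)) 1, PySem.Int.band (v >>> (2:Nat)) 1,
              PySem.Int.band (v >>> (1:Nat)) 1, PySem.Int.band v 1]) []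
  let mixed :=
    if 3 ≤ bits.length then
      pvMixLoopB bits bits.length (PySem.List.slice bits none (some 2)) 2
    else bits
  pvXorZipB mixed

-- ===== PRECONDITION & SPEC =====
-- Pre_ excludes exactly the inputs where input_values[start_value+i] raises IndexError
-- (Python's negative-index wraparound is allowed and matched).
def Pre_long_postprocessing (num_of_values : Int) (input_values : List Int) (start_value : Int) : Prop :=
  num_of_values ≤ 0 ∨
    (-(input_values.length : Int) ≤ start_value ∧
      start_value + num_of_values - 1 < (input_values.length : Int))
instance (num_of_values : Int) (input_values : List Int) (start_value : Int) : Decidable (Pre_long_postprocessing num_of_values input_values start_value) := by unfold Pre_long_postprocessing; infer_instance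

def pvWitness_long_postprocessing : Int × List Int × Int := (2, [3, 7, 1], 0)

def Spec_long_postprocessing (num_of_values : Int) (input_values : List Int) (start_value : Int) (out : List Int) : Prop := out = long_postprocessing_alt num_of_values input_values start_value
instance (num_of_values : Int) (input_values : List Int) (start_value : Int) (out : List Int) : Decidable (Spec_long_postprocessing num_of_values input_values start_value out) := by unfold Spec_long_postprocessing; infer_instance

-- ===== CLAIM (what is proved, stated in full; the proofs are below) =====
def Claim_equal_long_postprocessing : Prop := ∀ (num_of_values : Int) (input_values : List Int) (start_value : Int), Dom_long_postprocessing num_of_values input_values start_value → Pre_long_postprocessing num_of_values input_values start_value → Spec_long_postprocessing num_of_values input_values start_value (long_postprocessing num_of_values input_values start_value)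

-- ===== LEMMAS AND PROOFS =====

lemma pv_band15_bounds (n : Int) : 0 ≤ PySem.Int.band n 15 ∧ PySem.Int.band n 15 < 16 := by
  unfold PySem.Int.band
  split_ifs with h1 h2 h2 <;> try omega
  have : n.toNat &&& (15:Int).toNat ≤ (15:Int).toNat := Nat.and_le_right
  omega

lemma pv_bits16 (m : Int) (h0 : 0 ≤ m) (h1 : m < 16) :
    pvPadFuelA 4 ((PySem.Int.toBinChars m).map (fun c => ((c.toNat : Int) - 48))) =
      [PySem.Int.band (m >>> (3:Nat)) 1, PySem.Int.band (m >>> (2:Nat)) 1,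
       PySem.Int.band (m >>> (1:Nat)) 1, PySem.Int.band m 1] := by
  interval_cases m <;> decide

lemma pv_intToBits_eq (n : Int) :
    pvIntToBitsA n =
      [PySem.Int.band ((PySem.Int.band n 15) >>> (3:Nat)) 1,
       PySem.Int.band ((PySem.Int.band n 15) >>> (2:Nat)) 1,
       PySem.Int.band ((PySem.Int.band n 15) >>> (1:Nat)) 1,
       PySem.Int.band (PySem.Int.band n 15) 1] := by
  have h := pv_band15_bounds n
  exact pv_bits16 _ h.1 h.2

-- the interleaving that one mixing round performs (proof-side characterisation)
def pvIlv : List Int → List Int → List Int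
  | ms, [] => ms
  | [], xs => xs
  | m :: ms, x :: xs => m :: x :: pvIlv ms xs

lemma pvIlv_nil_right (ms : List Int) : pvIlv ms [] = ms := by cases ms <;> rfl

lemma pvIlv_cons (m x : Int) (ms xs : List Int) :
    pvIlv (m :: ms) (x :: xs) = m :: x :: pvIlv ms xs := rfl

lemma pv_ilv_length (ms xs : List Int) : (pvIlv ms xs).length = ms.length + xs.length := by
  induction ms generalizing xs with
  | nil => cases xs <;> simp [pvIlv]
  | cons m ms ih => cases xs <;> simp [pvIlv, ih]; omega

lemma pv_insertLoop_spec (input : List Int) :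
    ∀ (a : Nat) (mixed : List Int) (b cur : Nat),
      2*b + a ≤ mixed.length → cur + a ≤ input.length →
      pvInsertLoopA input mixed b cur a =
        (mixed.take (2*b) ++ pvIlv (mixed.drop (2*b)) ((input.drop cur).take a), cur + a) := by
  intro a
  induction a with
  | zero =>
      intro mixed b cur h1 h2
      simp [pvInsertLoopA, pvIlv_nil_right]
  | succ a ih =>
      intro mixed b cur h1 h2
      rw [pvInsertLoopA]
      have hx : PySem.List.pyGetD input (cur : Int) 0 = input[cur] := by
        rw [PySem.List.pyGetD_natCast]
        exact List.getD_eq_getElem _ _ (by omega)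
      have hins : PySem.List.insert mixed ((b : Int) * 2 + 1) (PySem.List.pyGetD input (cur : Int) 0)
          = mixed.take (2*b+1) ++ input[cur] :: mixed.drop (2*b+1) := by
        rw [hx, show ((b:Int) * 2 + 1) = ((2*b+1 : Nat) : Int) by push_cast; ring]
        exact PySem.List.insert_natCast _ _ _ (by omega)
      rw [hins, ih _ (b+1) (cur+1) (by simp; omega) (by omega)]
      have hlenT : (mixed.take (2*b+1)).length = 2*b+1 := by simp; omega
      congr 1
      · have e1 : 2*(b+1) = (mixed.take (2*b+1)).length + 1 := by omega
        rw [e1, List.take_length_add_append, List.drop_length_add_append]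
        have hmb : 2*b < mixed.length := by omega
        have hdrop : mixed.drop (2*b) = mixed[2*b] :: mixed.drop (2*b+1) :=
          List.drop_eq_getElem_cons hmb
        have hc : input.drop cur = input[cur] :: input.drop (cur+1) :=
          List.drop_eq_getElem_cons (by omega)
        conv_rhs => rw [hdrop, hc]
        simp only [List.take_zero, List.drop_succ_cons, List.drop_zero,
          List.take_succ_cons, pvIlv_cons]
        have ht : List.take (2*b+1) mixed = List.take (2*b) mixed ++ [mixed[2*b]] :=
          List.take_succ_eq_append_getElem hmb
        rw [ht]
        simp only [List.append_assoc, List.cons_append, List.nil_append]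
      · omega

lemma pv_zipfold_ilv (ms xs : List Int) (h : xs.length ≤ ms.length) :
    ((ms.zip xs).foldl (fun acc pq => acc ++ [pq.1, pq.2]) []) ++ ms.drop xs.length =
      pvIlv ms xs := by
  rw [PySem.List.foldl_append_eq_flatMap]
  induction ms generalizing xs with
  | nil => cases xs <;> simp_all [pvIlv]
  | cons m ms ih =>
      cases xs with
      | nil => simp [pvIlv]
      | cons x xs => simp_all [pvIlv]

lemma pv_round_nw (bits mixed : List Int) (cur a : Nat)
    (ha : a ≤ mixed.length - 1) (ha2 : a ≤ bits.length - cur) (hcur : cur ≤ bits.length) :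
    ((mixed.zip (PySem.List.slice bits (some (cur : Int)) (some ((cur : Int) + (a : Int))))).foldl
        (fun acc pq => acc ++ [pq.1, pq.2]) []) ++ PySem.List.slice mixed (some (a : Int)) none =
      pvIlv mixed ((bits.drop cur).take a) := by
  rw [PySem.List.slice_natCast_add, PySem.List.slice_from_natCast]
  have hlenc : ((bits.drop cur).take a).length = a := by simp; omega
  have := pv_zipfold_ilv mixed ((bits.drop cur).take a) (by rw [hlenc]; omega)
  rw [hlenc] at this
  exact this

lemma pv_mixLoop_eq (bits : List Int) :
    ∀ (fuel : Nat) (mixed : List Int) (cur : Nat),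
      cur = mixed.length → 2 ≤ mixed.length →
      pvMixLoopA bits fuel mixed cur = pvMixLoopB bits fuel mixed cur := by
  intro fuel
  induction fuel with
  | zero => intro mixed cur h1 h2; rfl
  | succ fuel ih =>
      intro mixed cur h1 h2
      rw [pvMixLoopA, pvMixLoopB]
      by_cases hg : mixed.length < bits.length
      · rw [if_pos hg, if_pos (by omega)]
        have hA : (if cur + (mixed.length - 1) > bits.length then bits.length - cur
                   else mixed.length - 1) = min (mixed.length - 1) (bits.length - cur) := by
          split_ifs with h <;> omega
        set a := min (mixed.length - 1) (bits.length - cur) with hadef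
        have ha1 : a ≤ mixed.length - 1 := by omega
        have ha2 : a ≤ bits.length - cur := by omega
        have hspec := pv_insertLoop_spec bits a mixed 0 cur (by omega) (by omega)
        simp only [Nat.mul_zero, List.take_zero, List.drop_zero, List.nil_append] at hspec
        simp only [hA, hspec]
        rw [pv_round_nw bits mixed cur a ha1 ha2 (by omega)]
        exact ih _ (cur + a) (by rw [pv_ilv_length]; simp; omega) (by rw [pv_ilv_length]; omega)
      · rw [if_neg hg, if_neg (by omega)]

lemma pv_mixLoopB_length (bits : List Int) :
    ∀ (fuel : Nat) (mixed : List Int) (cur : Nat),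
      cur = mixed.length → 2 ≤ mixed.length → cur ≤ bits.length →
      bits.length - cur ≤ fuel →
      (pvMixLoopB bits fuel mixed cur).length = bits.length := by
  intro fuel
  induction fuel with
  | zero => intro mixed cur h1 h2 h3 h4; rw [pvMixLoopB]; omega
  | succ fuel ih =>
      intro mixed cur h1 h2 h3 h4
      rw [pvMixLoopB]
      by_cases hg : cur < bits.length
      · rw [if_pos hg]
        dsimp only
        set a := min (mixed.length - 1) (bits.length - cur) with hadef
        have ha : 1 ≤ a := by omega
        rw [pv_round_nw bits mixed cur a (by omega) (by omega) (by omega)]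
        have hl : (pvIlv mixed ((bits.drop cur).take a)).length = mixed.length + a := by
          rw [pv_ilv_length]; simp; omega
        exact ih _ (cur + a) (by omega) (by omega) (by omega) (by omega)
      · rw [if_neg hg]; omega

lemma pv_evens (l : List Int) (m : Nat) (hm : l.length = 2*m) :
    PySem.List.slice? l none none 2 = some ((List.range m).map (fun k => l.getD (2*k) 0)) := by
  simp only [PySem.List.slice?, PySem.List.sliceIndices]
  norm_num
  have hc : (if 0 < l.length then (((l.length:Int) + 2 - 1) / 2).toNat else 0) = m := by
    split_ifs <;> omega
  rw [hc, List.filterMap_eq_map_iff_forall_eq_some.mpr]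
  intro k hk
  simp at hk
  have h2k : (2*(k:Int)).toNat = 2*k := by omega
  rw [h2k, List.getElem?_eq_getElem (by omega)]; rfl

lemma pv_odds (l : List Int) (m : Nat) (hm : l.length = 2*m) :
    PySem.List.slice? l (some 1) none 2 = some ((List.range m).map (fun k => l.getD (2*k+1) 0)) := by
  simp only [PySem.List.slice?, PySem.List.sliceIndices]
  norm_num
  have hc : (if 1 < l.length then (((l.length:Int) - min 1 (l.length:Int) + 2 - 1) / 2).toNat else 0) = m := by
    split_ifs <;> omega
  rw [hc, List.filterMap_eq_map_iff_forall_eq_some.mpr]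
  intro k hk
  simp at hk
  have h2k : (min 1 (l.length:Int) + 2*(k:Int)).toNat = 2*k+1 := by omega
  rw [h2k, List.getElem?_eq_getElem (by omega)]; rfl

lemma pv_xorA_map (l : List Int) (m : Nat) (hm : l.length = 2*m) :
    pvXorOpA l =
      (List.range m).map (fun k => PySem.Int.bxor (l.getD (2*k) 0) (l.getD (2*k+1) 0)) := by
  unfold pvXorOpA
  rw [PySem.List.pyRange_of_pos _ _ (by norm_num : (0:Int) < 2)]
  rw [List.foldl_map, PySem.List.foldl_append_eq_flatMap]
  have hcount : (if (0:Int) < (l.length:Int) then (((l.length:Int) - 0 + 2 - 1) / 2).toNat else 0) = m := by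
    split_ifs with h0 <;> omega
  rw [hcount, ← List.map_eq_flatMap]
  simp only [List.nil_append]
  apply List.map_congr_left
  intro k hk
  have e1 : (0:Int) + 2*(k:Int) = ((2*k:Nat):Int) := by push_cast; ring
  rw [e1, show ((2*k:Nat):Int) + 1 = ((2*k+1 : Nat) : Int) by push_cast; ring,
      PySem.List.pyGetD_natCast, PySem.List.pyGetD_natCast]

lemma pv_xorB_map (l : List Int) (m : Nat) (hm : l.length = 2*m) :
    pvXorZipB l =
      (List.range m).map (fun k => PySem.Int.bxor (l.getD (2*k) 0) (l.getD (2*k+1) 0)) := by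
  unfold pvXorZipB
  rw [pv_evens l m hm, pv_odds l m hm]
  simp only [Option.getD_some]
  rw [List.zip_map', List.map_map]
  rfl

lemma pv_xor_eq (l : List Int) (h : l.length % 2 = 0) :
    pvXorOpA l = pvXorZipB l := by
  obtain ⟨m, hm⟩ : ∃ m, l.length = 2*m := ⟨l.length / 2, by omega⟩
  rw [pv_xorA_map l m hm, pv_xorB_map l m hm]

lemma pv_bits_eq (num s : Int) (qs : List Int) :
    (PySem.List.pyRange 0 num 1).foldl
      (fun acc i => acc ++ pvIntToBitsA (PySem.List.pyGetD qs (s + i) 0)) [] =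
    (PySem.List.pyRange 0 num 1).foldl
      (fun acc i =>
        let v := PySem.Int.band (PySem.List.pyGetD qs (s + i) 0) 15
        acc ++ [PySem.Int.band (v >>> (3:Nat)) 1, PySem.Int.band (v >>> (2:Nat)) 1,
                PySem.Int.band (v >>> (1:Nat)) 1, PySem.Int.band v 1]) [] := by
  congr 1
  funext acc i
  rw [pv_intToBits_eq]

lemma pv_bits_len_mod4 (num s : Int) (qs : List Int) :
    ((PySem.List.pyRange 0 num 1).foldl
      (fun acc i =>
        let v := PySem.Int.band (PySem.List.pyGetD qs (s + i) 0) 15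
        acc ++ [PySem.Int.band (v >>> (3:Nat)) 1, PySem.Int.band (v >>> (2:Nat)) 1,
                PySem.Int.band (v >>> (1:Nat)) 1, PySem.Int.band v 1]) []).length % 4 = 0 := by
  rw [PySem.List.foldl_append_eq_flatMap]
  simp [List.length_flatMap]

-- ===== VERDICT (by name: the statement is the Claim_ definition above) =====
theorem long_postprocessing_spec : Claim_equal_long_postprocessing := by
  intro num qs s hdom hpre
  unfold Spec_long_postprocessing long_postprocessing long_postprocessing_alt
  rw [pv_bits_eq]
  set bits := (PySem.List.pyRange 0 num 1).foldl
      (fun acc i =>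
        let v := PySem.Int.band (PySem.List.pyGetD qs (s + i) 0) 15
        acc ++ [PySem.Int.band (v >>> (3:Nat)) 1, PySem.Int.band (v >>> (2:Nat)) 1,
                PySem.Int.band (v >>> (1:Nat)) 1, PySem.Int.band v 1]) [] with hbits
  have hmod4 : bits.length % 4 = 0 := pv_bits_len_mod4 num s qs
  unfold pvMixBitsA
  dsimp only
  by_cases hlen : bits.length < 3
  · rw [if_pos hlen, if_neg (by omega)]
    exact pv_xor_eq bits (by omega)
  · rw [if_neg hlen, if_pos (by omega)]
    obtain ⟨x, y, rest, hxy⟩ : ∃ x y rest, bits = x :: y :: rest := by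
      match bits, hlen with
      | x :: y :: rest, _ => exact ⟨x, y, rest, rfl⟩
      | [], h => exact (h (by simp)).elim
      | [x], h => exact (h (by simp)).elim
    have hinit : PySem.List.slice bits none (some 2) =
        [PySem.List.pyGetD bits 0 0, PySem.List.pyGetD bits 1 0] := by
      rw [PySem.List.slice_to _ (by norm_num), hxy]
      simp [pysem]
    rw [hinit, pv_mixLoop_eq bits bits.length _ 2 (by rfl) (by rfl)]
    apply pv_xor_eq
    have := pv_mixLoopB_length bits bits.length
      [PySem.List.pyGetD bits 0 0, PySem.List.pyGetD bits 1 0] 2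
      rfl (by rfl) (by omega) (by omega)
    omega
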